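-- pv_equiv track=rewrite | github.com/AssisClue/ASSISCLUE | app/system_support/commands/command_parser.py | _truncate_before_destination
-- ===== SOURCE A (Python) =====
-- def _truncate_before_destination(value: str) -> str:
--     lowered = value.lower()
--     cut_positions = [
--         lowered.find(marker)
--         for marker in (" folder ", " in ")
--         if marker in lowered
--     ]
--     if not cut_positions:
--         return value.strip()
--     cut_index = min(position for position in cut_positions if position >= 0)
--     return value[:cut_index].strip(" :,-")
-- ===== SOURCE B (Python) =====
-- def _truncate_before_destination(value: str) -> str:
--     low = value.lower()
--     for i in range(len(low)):
--         if low.startswith((" folder ", " in "), i):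
--             return value[:i].strip(" :,-")
--     return value.strip()
-- ===== Notes on version B (the rewrite author's own statement) =====
-- stated objective: idiomatic
-- what changed: Replaced the two independent str.find scans plus a filter/min reduction by one left-to-right scan that stops at the first position where either marker starts (str.startswith with a tuple and an offset).
import Mathlib
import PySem

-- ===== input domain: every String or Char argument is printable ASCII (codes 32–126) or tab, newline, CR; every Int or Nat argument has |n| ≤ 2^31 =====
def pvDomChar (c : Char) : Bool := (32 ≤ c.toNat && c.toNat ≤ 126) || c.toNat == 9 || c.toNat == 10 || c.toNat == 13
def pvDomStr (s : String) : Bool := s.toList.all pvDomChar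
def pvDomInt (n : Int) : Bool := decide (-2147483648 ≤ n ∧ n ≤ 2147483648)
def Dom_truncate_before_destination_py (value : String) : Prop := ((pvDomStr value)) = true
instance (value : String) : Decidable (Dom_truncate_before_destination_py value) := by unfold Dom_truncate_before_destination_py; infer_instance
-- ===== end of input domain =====

-- B replaces A's two independent find scans plus a filter/min reduction by one left-to-right
-- scan that stops at the first position where either marker starts (objective: idiomatic).

-- ===== PORT A =====
def truncate_before_destination_py (value : String) : String :=
  let lowered := PySem.Str.lower value
  let cut_positions : List Int :=
    ((([" folder ", " in "] : List String).filter
        (fun marker => PySem.Str.isIn marker lowered)).map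
      (fun marker => PySem.Str.find lowered marker))
  if cut_positions = [] then PySem.Str.strip value
  else
    match PySem.List.min? (cut_positions.filter (fun p => decide (0 ≤ p))) id with
    | some cut_index => PySem.Str.stripChars (PySem.Str.slice value none (some cut_index)) " :,-"
    | none => value  -- unreachable: min() over an empty generator would raise, but each kept find is ≥ 0

-- ===== PORT B =====
-- Source B's loop 'for i in range(len(low)): if low.startswith((" folder ", " in "), i): …'
-- as structural recursion on the remaining suffix low[i:] (the same state: i and low[i:]).
def altGo (orig : List Char) (i : Nat) : List Char → List Char
  | [] => PySem.Chars.strip orig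
  | c :: tl =>
    if PySem.Chars.startswith (c :: tl) " folder ".toList
        || PySem.Chars.startswith (c :: tl) " in ".toList then
      PySem.Chars.stripChars (orig.take i) " :,-".toList
    else altGo orig (i + 1) tl

def truncate_before_destination_py_alt (value : String) : String :=
  String.ofList (altGo value.toList 0 (PySem.Chars.lower value.toList))

-- ===== PRECONDITION & SPEC =====
def Spec_truncate_before_destination_py (value : String) (out : String) : Prop := out = truncate_before_destination_py_alt value
instance (value : String) (out : String) : Decidable (Spec_truncate_before_destination_py value out) := by unfold Spec_truncate_before_destination_py; infer_instance

-- ===== CLAIM (what is proved, stated in full; the proofs are below) =====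
def Claim_equal_truncate_before_destination_py : Prop := ∀ (value : String), Dom_truncate_before_destination_py value → Spec_truncate_before_destination_py value (truncate_before_destination_py value)

-- ===== LEMMAS AND PROOFS =====

-- "either marker starts here"
def pvHit (rest : List Char) : Bool :=
  PySem.Chars.startswith rest " folder ".toList || PySem.Chars.startswith rest " in ".toList

-- index of the first hit, if any
def pvFh : List Char → Option Nat
  | [] => none
  | c :: tl => if pvHit (c :: tl) then some 0 else (pvFh tl).map (· + 1)

theorem altGo_eq_fh (rest orig : List Char) (i : Nat) :
    altGo orig i rest =
      match pvFh rest with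
      | none => PySem.Chars.strip orig
      | some k => PySem.Chars.stripChars (orig.take (i + k)) " :,-".toList := by
  induction rest generalizing i with
  | nil => simp [altGo, pvFh]
  | cons c tl ih =>
    have e : altGo orig i (c :: tl) =
        if pvHit (c :: tl) then PySem.Chars.stripChars (orig.take i) " :,-".toList
        else altGo orig (i + 1) tl := rfl
    rw [e]
    by_cases h : pvHit (c :: tl) = true
    · rw [if_pos h]
      simp only [pvFh, if_pos h, Nat.add_zero]
    · rw [if_neg h, ih]
      simp only [pvFh, if_neg h]
      cases pvFh tl with
      | none => rfl
      | some k => simp [Nat.add_assoc, Nat.add_comm 1 k]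

theorem fh_none_of (rest : List Char) (h : ∀ k, pvHit (rest.drop k) = false) :
    pvFh rest = none := by
  induction rest with
  | nil => rfl
  | cons c tl ih =>
    have h0 := h 0
    simp only [List.drop_zero] at h0
    simp only [pvFh, h0, Bool.false_eq_true, if_false]
    rw [ih (fun k => by simpa using h (k + 1))]
    rfl

theorem fh_some_of (rest : List Char) (k : Nat) (hk : pvHit (rest.drop k) = true)
    (hmin : ∀ j, j < k → pvHit (rest.drop j) = false) :
    pvFh rest = some k := by
  induction rest generalizing k with
  | nil => exact absurd (by simpa using hk) (by decide)
  | cons c tl ih =>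
    cases k with
    | zero =>
      simp only [List.drop_zero] at hk
      simp [pvFh, hk]
    | succ k' =>
      have h0 : pvHit (c :: tl) = false := by simpa using hmin 0 (Nat.succ_pos _)
      simp only [pvFh, h0, Bool.false_eq_true, if_false]
      rw [ih k' (by simpa using hk) (fun j hj => by simpa using hmin (j + 1) (by omega))]
      rfl

-- a marker found in s: find gives the least index where it is a prefix of the drop
theorem find_present (s m : List Char) (h : PySem.Chars.isIn m s = true) :
    0 ≤ PySem.Chars.find s m ∧ m <+: s.drop (PySem.Chars.find s m).toNat ∧
      ∀ i, i < (PySem.Chars.find s m).toNat → ¬ m <+: s.drop i := by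
  have hne : PySem.Chars.find s m ≠ -1 := by
    rw [Ne, PySem.Chars.find_eq_neg_one_iff]
    exact not_not_intro ((PySem.Chars.isIn_iff_infix m s).mp h)
  have hspec := PySem.Chars.findFrom_natCast_spec s m 0 (Nat.zero_le _)
    (by rwa [Nat.cast_zero, PySem.Chars.findFrom_zero])
  rw [Nat.cast_zero, PySem.Chars.findFrom_zero] at hspec
  exact ⟨by exact_mod_cast hspec.1, hspec.2.1, fun i hi => hspec.2.2 i (Nat.zero_le _) hi⟩

theorem find_absent (s m : List Char) (h : PySem.Chars.isIn m s = false) :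
    ∀ i, ¬ m <+: s.drop i := by
  intro i hp
  have : m <:+: s := hp.isInfix.trans (List.drop_suffix i s).isInfix
  rw [← PySem.Chars.isIn_iff_infix] at this
  simp [h] at this

theorem hit_of_prefix {s : List Char} {k : Nat}
    (h : " folder ".toList <+: s.drop k ∨ " in ".toList <+: s.drop k) :
    pvHit (s.drop k) = true := by
  simp only [pvHit, Bool.or_eq_true, PySem.Chars.startswith_iff]
  exact h

theorem hit_false_iff (s : List Char) (k : Nat) :
    pvHit (s.drop k) = false ↔
      ¬ " folder ".toList <+: s.drop k ∧ ¬ " in ".toList <+: s.drop k := by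
  rw [← Bool.not_eq_true, pvHit, Bool.or_eq_true, not_or,
    PySem.Chars.startswith_iff, PySem.Chars.startswith_iff]

theorem str_eq_of_toList {s t : String} (h : s.toList = t.toList) : s = t :=
  String.toList_inj.mp h

-- A's result in each of the four marker-presence cases
theorem A_both (value : String)
    (h1 : PySem.Chars.isIn " folder ".toList (PySem.Chars.lower value.toList) = true)
    (h2 : PySem.Chars.isIn " in ".toList (PySem.Chars.lower value.toList) = true)
    (hn1 : (0:Int) ≤ PySem.Chars.find (PySem.Chars.lower value.toList) " folder ".toList)
    (hn2 : (0:Int) ≤ PySem.Chars.find (PySem.Chars.lower value.toList) " in ".toList) :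
    (truncate_before_destination_py value).toList =
      PySem.Chars.stripChars
        (value.toList.take (min (PySem.Chars.find (PySem.Chars.lower value.toList) " folder ".toList).toNat
          (PySem.Chars.find (PySem.Chars.lower value.toList) " in ".toList).toNat)) " :,-".toList := by
  simp only [truncate_before_destination_py, List.filter, PySem.Str.isIn_eq, PySem.Str.toList_lower,
    h1, h2, List.map, PySem.Str.find_eq, decide_eq_true hn1, decide_eq_true hn2,
    PySem.List.min?, List.foldl, id, reduceCtorEq, if_false]
  rcases lt_or_ge (PySem.Chars.find (PySem.Chars.lower value.toList) " in ".toList)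
    (PySem.Chars.find (PySem.Chars.lower value.toList) " folder ".toList) with hlt | hge
  · rw [if_pos hlt]
    simp only [PySem.Str.toList_stripChars, PySem.Str.toList_slice, PySem.Chars.slice_eq_listSlice,
      PySem.List.slice_to _ hn2]
    congr 2
    omega
  · rw [if_neg (not_lt.mpr hge)]
    simp only [PySem.Str.toList_stripChars, PySem.Str.toList_slice, PySem.Chars.slice_eq_listSlice,
      PySem.List.slice_to _ hn1]
    congr 2
    omega

theorem A_only1 (value : String)
    (h1 : PySem.Chars.isIn " folder ".toList (PySem.Chars.lower value.toList) = true)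
    (h2 : PySem.Chars.isIn " in ".toList (PySem.Chars.lower value.toList) = false)
    (hn1 : (0:Int) ≤ PySem.Chars.find (PySem.Chars.lower value.toList) " folder ".toList) :
    (truncate_before_destination_py value).toList =
      PySem.Chars.stripChars
        (value.toList.take (PySem.Chars.find (PySem.Chars.lower value.toList) " folder ".toList).toNat)
        " :,-".toList := by
  simp only [truncate_before_destination_py, List.filter, PySem.Str.isIn_eq, PySem.Str.toList_lower,
    h1, h2, List.map, PySem.Str.find_eq, decide_eq_true hn1,
    PySem.List.min?, List.foldl, id, reduceCtorEq, if_false,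
    PySem.Str.toList_stripChars, PySem.Str.toList_slice, PySem.Chars.slice_eq_listSlice,
    PySem.List.slice_to _ hn1]

theorem A_only2 (value : String)
    (h1 : PySem.Chars.isIn " folder ".toList (PySem.Chars.lower value.toList) = false)
    (h2 : PySem.Chars.isIn " in ".toList (PySem.Chars.lower value.toList) = true)
    (hn2 : (0:Int) ≤ PySem.Chars.find (PySem.Chars.lower value.toList) " in ".toList) :
    (truncate_before_destination_py value).toList =
      PySem.Chars.stripChars
        (value.toList.take (PySem.Chars.find (PySem.Chars.lower value.toList) " in ".toList).toNat)
        " :,-".toList := by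
  simp only [truncate_before_destination_py, List.filter, PySem.Str.isIn_eq, PySem.Str.toList_lower,
    h1, h2, List.map, PySem.Str.find_eq, decide_eq_true hn2,
    PySem.List.min?, List.foldl, id, reduceCtorEq, if_false,
    PySem.Str.toList_stripChars, PySem.Str.toList_slice, PySem.Chars.slice_eq_listSlice,
    PySem.List.slice_to _ hn2]

theorem A_none (value : String)
    (h1 : PySem.Chars.isIn " folder ".toList (PySem.Chars.lower value.toList) = false)
    (h2 : PySem.Chars.isIn " in ".toList (PySem.Chars.lower value.toList) = false) :
    (truncate_before_destination_py value).toList = PySem.Chars.strip value.toList := by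
  simp only [truncate_before_destination_py, List.filter, PySem.Str.isIn_eq, PySem.Str.toList_lower,
    h1, h2, List.map]
  simp [PySem.Str.toList_strip]

-- ===== VERDICT (by name: the statement is the Claim_ definition above) =====
theorem truncate_before_destination_py_spec : Claim_equal_truncate_before_destination_py := by
  intro value _
  unfold Spec_truncate_before_destination_py
  apply str_eq_of_toList
  have hBlist : (truncate_before_destination_py_alt value).toList
      = altGo value.toList 0 (PySem.Chars.lower value.toList) := by
    simp [truncate_before_destination_py_alt]
  rw [hBlist, altGo_eq_fh]
  by_cases h1 : PySem.Chars.isIn " folder ".toList (PySem.Chars.lower value.toList) = true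
  · have hp1 := find_present (PySem.Chars.lower value.toList) " folder ".toList h1
    by_cases h2 : PySem.Chars.isIn " in ".toList (PySem.Chars.lower value.toList) = true
    · -- both markers present
      have hp2 := find_present (PySem.Chars.lower value.toList) " in ".toList h2
      have hfh : pvFh (PySem.Chars.lower value.toList)
          = some (min (PySem.Chars.find (PySem.Chars.lower value.toList) " folder ".toList).toNat
                      (PySem.Chars.find (PySem.Chars.lower value.toList) " in ".toList).toNat) := by
        apply fh_some_of
        · apply hit_of_prefix
          rcases Nat.le_total (PySem.Chars.find (PySem.Chars.lower value.toList) " folder ".toList).toNat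
            (PySem.Chars.find (PySem.Chars.lower value.toList) " in ".toList).toNat with hle | hle
          · left; rw [min_eq_left hle]; exact hp1.2.1
          · right; rw [min_eq_right hle]; exact hp2.2.1
        · intro j hj
          rw [hit_false_iff]
          exact ⟨hp1.2.2 j (by omega), hp2.2.2 j (by omega)⟩
      rw [hfh, A_both value h1 h2 hp1.1 hp2.1]
      simp
    · -- only " folder " present
      have h2' : PySem.Chars.isIn " in ".toList (PySem.Chars.lower value.toList) = false := by
        simpa using h2
      have hfh : pvFh (PySem.Chars.lower value.toList)
          = some (PySem.Chars.find (PySem.Chars.lower value.toList) " folder ".toList).toNat := by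
        apply fh_some_of
        · exact hit_of_prefix (Or.inl hp1.2.1)
        · intro j hj
          rw [hit_false_iff]
          exact ⟨hp1.2.2 j hj, find_absent _ _ h2' j⟩
      rw [hfh, A_only1 value h1 h2' hp1.1]
      simp
  · have h1' : PySem.Chars.isIn " folder ".toList (PySem.Chars.lower value.toList) = false := by
      simpa using h1
    by_cases h2 : PySem.Chars.isIn " in ".toList (PySem.Chars.lower value.toList) = true
    · -- only " in " present
      have hp2 := find_present (PySem.Chars.lower value.toList) " in ".toList h2
      have hfh : pvFh (PySem.Chars.lower value.toList)
          = some (PySem.Chars.find (PySem.Chars.lower value.toList) " in ".toList).toNat := by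
        apply fh_some_of
        · exact hit_of_prefix (Or.inr hp2.2.1)
        · intro j hj
          rw [hit_false_iff]
          exact ⟨find_absent _ _ h1' j, hp2.2.2 j hj⟩
      rw [hfh, A_only2 value h1' h2 hp2.1]
      simp
    · -- no marker present
      have h2' : PySem.Chars.isIn " in ".toList (PySem.Chars.lower value.toList) = false := by
        simpa using h2
      have hfh : pvFh (PySem.Chars.lower value.toList) = none := by
        apply fh_none_of
        intro k
        rw [hit_false_iff]
        exact ⟨find_absent _ _ h1' k, find_absent _ _ h2' k⟩
      rw [hfh, A_none value h1' h2']
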